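-- pv_equiv track=rewrite | github.com/olsgo/MaxPyLang | maxpylang/cli/main.py | _infer_command_from_args
-- ===== SOURCE A (Python) =====
-- _KNOWN_COMMANDS = {
--     "new",
--     "list-objects",
--     "place",
--     "connect",
--     "replace",
--     "delete",
--     "check",
--     "save",
--     "export-amxd",
--     "config",
-- }
--
-- def _infer_command_from_args(args: list[str]) -> str:
--     for idx, token in enumerate(args):
--         if token.startswith("-"):
--             continue
--         if token in _KNOWN_COMMANDS:
--             if token == "config":
--                 for sub in args[idx + 1 :]:
--                     if not sub.startswith("-"):
--                         return f"config {sub}"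
--             return token
--
--     for token in args:
--         if not token.startswith("-"):
--             return token
--
--     return "cli"
-- ===== SOURCE B (Python) =====
-- _KNOWN_COMMANDS = {
--     "new",
--     "list-objects",
--     "place",
--     "connect",
--     "replace",
--     "delete",
--     "check",
--     "save",
--     "export-amxd",
--     "config",
-- }
--
-- def _infer_command_from_args(args: list[str]) -> str:
--     # Single pass backwards.  Invariant while scanning token t with suffix S
--     # already processed: `cmd` is the command answer for S (or None) and `nf`
--     # is the first non-flag token of S (or None).  A known token overwrites
--     # `cmd` (earlier tokens win), and "config"'s subcommand is exactly `nf`.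
--     cmd = None
--     nf = None
--     for t in reversed(args):
--         if t.startswith("-"):
--             continue
--         if t in _KNOWN_COMMANDS:
--             cmd = f"config {nf}" if (t == "config" and nf is not None) else t
--         nf = t
--     if cmd is not None:
--         return cmd
--     return nf if nf is not None else "cli"
-- ===== Notes on version B (the rewrite author's own statement) =====
-- stated objective: alternative
-- what changed: B makes one backwards pass over the arguments carrying two accumulators (the command answer for the suffix seen so far and the suffix's first non-flag token, which doubles as config's subcommand), whereas A scans forwards, re-scans the suffix args[idx+1:] inside the loop for config's subcommand, and runs a second whole-list loop for the fallback.
import Mathlib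
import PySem

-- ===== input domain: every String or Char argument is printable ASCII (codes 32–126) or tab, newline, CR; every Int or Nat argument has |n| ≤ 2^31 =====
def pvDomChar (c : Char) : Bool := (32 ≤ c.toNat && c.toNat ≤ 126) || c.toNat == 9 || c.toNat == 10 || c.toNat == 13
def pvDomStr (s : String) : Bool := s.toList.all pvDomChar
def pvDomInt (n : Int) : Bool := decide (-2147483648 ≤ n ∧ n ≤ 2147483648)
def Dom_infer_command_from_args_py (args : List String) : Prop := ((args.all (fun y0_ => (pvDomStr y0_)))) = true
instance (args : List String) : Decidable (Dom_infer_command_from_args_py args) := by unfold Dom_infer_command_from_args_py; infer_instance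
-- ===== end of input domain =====

-- B replaces A's forward scan (with an inner suffix re-scan for config's subcommand and a
-- second whole-list fallback loop) by ONE backwards pass carrying two accumulators; same cost,
-- a genuinely different traversal.


-- ===== PORT A =====
def pvKnownCommands : List String :=
  ["new", "list-objects", "place", "connect", "replace", "delete",
   "check", "save", "export-amxd", "config"]

-- inner scan 'for sub in args[idx+1:]': first non-flag sub gives "config {sub}"
def pvAInner : List String → Option String
  | [] => none
  | sub :: rest =>
    if !(PySem.Str.startswith sub "-") then some ("config " ++ sub)
    else pvAInner rest

-- main loop: the suffix args[idx+1:] is exactly the remaining list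
def pvALoop : List String → Option String
  | [] => none
  | token :: rest =>
    if PySem.Str.startswith token "-" then pvALoop rest
    else if token ∈ pvKnownCommands then
      if token = "config" then
        match pvAInner rest with
        | some s => some s
        | none => some token
      else some token
    else pvALoop rest

-- second loop: first non-flag token
def pvAFallback : List String → Option String
  | [] => none
  | token :: rest =>
    if !(PySem.Str.startswith token "-") then some token
    else pvAFallback rest

def infer_command_from_args_py (args : List String) : String :=
  match pvALoop args with
  | some s => s
  | none =>
    match pvAFallback args with
    | some s => s
    | none => "cli"

-- ===== PORT B =====
-- one iteration of B's 'for t in reversed(args)' loop on the state (cmd, nf);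
-- the reversed loop is List.foldr of this step over args
def pvBStep (t : String) (st : Option String × Option String) :
    Option String × Option String :=
  if PySem.Str.startswith t "-" then st
  else
    let cmd :=
      if t ∈ pvKnownCommands then
        if t = "config" ∧ st.2.isSome then some ("config " ++ st.2.getD "")
        else some t
      else st.1
    (cmd, some t)

def infer_command_from_args_py_alt (args : List String) : String :=
  let st := args.foldr pvBStep (none, none)
  match st.1 with
  | some c => c
  | none =>
    match st.2 with
    | some s => s
    | none => "cli"

-- ===== PRECONDITION & SPEC =====
def Spec_infer_command_from_args_py (args : List String) (out : String) : Prop := out = infer_command_from_args_py_alt args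
instance (args : List String) (out : String) : Decidable (Spec_infer_command_from_args_py args out) := by unfold Spec_infer_command_from_args_py; infer_instance

-- ===== CLAIM (what is proved, stated in full; the proofs are below) =====
def Claim_equal_infer_command_from_args_py : Prop := ∀ (args : List String), Dom_infer_command_from_args_py args → Spec_infer_command_from_args_py args (infer_command_from_args_py args)

-- ===== LEMMAS AND PROOFS =====

-- A's inner config scan is its fallback scan with "config " prepended
theorem pvAInner_eq (xs : List String) :
    pvAInner xs = (pvAFallback xs).map (fun s => "config " ++ s) := by
  induction xs with
  | nil => rfl
  | cons x xs ih =>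
    simp only [pvAInner, pvAFallback]
    by_cases h : PySem.Chars.startswith x.toList ['-'] = false
    · simp [h]
    · simp [h, ih]

-- B's backwards fold computes exactly (A's command scan, A's fallback scan)
theorem pvFoldr_eq (xs : List String) :
    xs.foldr pvBStep (none, none) = (pvALoop xs, pvAFallback xs) := by
  induction xs with
  | nil => rfl
  | cons x xs ih =>
    simp only [List.foldr_cons, ih, pvBStep, pvALoop, pvAFallback]
    by_cases hf : PySem.Str.startswith x "-" = true
    · have hfC : PySem.Chars.startswith x.toList ['-'] = true := by
        simpa [PySem.Str.startswith_eq] using hf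
      simp [hfC]
    · have hfS : PySem.Str.startswith x "-" = false := by
        revert hf; cases PySem.Str.startswith x "-" <;> simp
      rw [hfS]
      simp only [Bool.false_eq_true, if_false, Bool.not_false, if_true]
      refine Prod.ext ?_ rfl
      by_cases hk : x ∈ pvKnownCommands
      · rw [if_pos hk, if_pos hk]
        by_cases hc : x = "config"
        · subst hc
          rw [pvAInner_eq]
          rcases pvAFallback xs with _ | s
          · rw [if_neg (by simp)]
            simp
          · rw [if_pos (by simp)]
            simp
        · rw [if_neg (fun hx => hc hx.1), if_neg hc]
      · rw [if_neg hk, if_neg hk]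

-- ===== VERDICT (by name: the statement is the Claim_ definition above) =====
theorem infer_command_from_args_py_spec : Claim_equal_infer_command_from_args_py := by
  intro args _
  unfold Spec_infer_command_from_args_py infer_command_from_args_py infer_command_from_args_py_alt
  rw [pvFoldr_eq]
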